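-- pv_equiv track=rewrite | github.com/wangziyu99/HealthAgentBenchmark-HealthQ | _metric.py | find_words_in_string
-- ===== SOURCE A (Python) =====
-- def find_words_in_string(terms_dict, text):
--     """
--     Searches for terms (both single words and multi-word phrases) from terms_dict within a long string.
--
--     Args:
--     - terms_dict (dict): A dictionary of terms to search for.
--     - text (str): The string in which to search.
--
--     Returns:
--     - A dictionary containing found terms as keys and lists of indices where they began in the string as values.
--     """
--
--     found_terms = {}
--     for term in terms_dict:
--         start_index = 0  # Start the search from the beginning of the text
--         indices = []
--
--         while start_index < len(text):
--             idx = text.find(term, start_index)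
--
--             # If the term is found, add the index and move the start_index
--             if idx != -1:
--                 indices.append(idx)
--                 start_index = idx + 1
--             else:
--                 break
--
--         if indices:
--             found_terms[term] = indices
--
--     return found_terms
-- ===== SOURCE B (Python) =====
-- def find_words_in_string(terms_dict, text):
--     n = len(text)
--     hits = {}
--     for i in range(n):
--         for term in terms_dict:
--             if text.startswith(term, i):
--                 hits.setdefault(term, []).append(i)
--     return {t: hits[t] for t in terms_dict if t in hits}
-- ===== Notes on version B (the rewrite author's own statement) =====
-- stated objective: alternative
-- what changed: A searches term-by-term with a repeated str.find jump loop; B makes a single left-to-right pass over the text positions, testing every term at each position with startswith and grouping hits per term, then emits the matched terms in dictionary order.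
import Mathlib
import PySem

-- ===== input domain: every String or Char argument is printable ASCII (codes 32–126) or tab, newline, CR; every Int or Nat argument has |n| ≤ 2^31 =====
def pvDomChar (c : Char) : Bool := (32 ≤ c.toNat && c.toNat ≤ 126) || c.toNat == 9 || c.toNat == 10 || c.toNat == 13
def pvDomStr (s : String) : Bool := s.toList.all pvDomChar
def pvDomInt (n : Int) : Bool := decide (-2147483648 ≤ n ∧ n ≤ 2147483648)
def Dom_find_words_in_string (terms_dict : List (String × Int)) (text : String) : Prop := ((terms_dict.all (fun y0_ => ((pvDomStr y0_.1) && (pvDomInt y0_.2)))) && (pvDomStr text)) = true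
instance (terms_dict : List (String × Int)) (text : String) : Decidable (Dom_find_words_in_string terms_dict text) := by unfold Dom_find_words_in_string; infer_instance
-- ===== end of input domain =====

-- B replaces A's term-by-term repeated str.find jump loop by a single left-to-right pass over
-- the text positions testing every term with startswith (objective: alternative, same cost class).

-- ===== PORT A =====
-- A's inner while-loop: repeated text.find(term, start) (= PySem.Chars.findFrom), collecting
-- overlapping match indices; recursion measure is the remaining suffix length.
def findLoopA (t cs : List Char) (start : Nat) (acc : List Int) : List Int :=
  if h : start < cs.length then
    let idx := PySem.Chars.findFrom cs t (start : Int) none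
    if hidx : idx ≠ -1 then
      findLoopA t cs (idx.toNat + 1) (acc ++ [idx])
    else acc
  else acc
termination_by cs.length - start
decreasing_by
  have h1 := (PySem.Chars.findFrom_natCast_spec cs t start (le_of_lt h) hidx).1
  omega

def find_words_in_string (terms_dict : List (String × Int)) (text : String) : List (String × List Int) :=
  let cs := text.toList
  -- 'for term in terms_dict' iterates the dict's (distinct, first-occurrence-ordered) keys
  let keys := (PySem.Dict.ofList terms_dict).keys
  (keys.foldl (fun (d : PySem.Dict String (List Int)) term =>
      let indices := findLoopA term.toList cs 0 []
      if indices = [] then d else d.insert term indices) PySem.Dict.empty).items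

-- ===== PORT B =====
-- text.startswith(term, i) for 0 ≤ i: exact as prefix test on the suffix starting at i
def pvMatchAt (t cs : List Char) (i : Nat) : Bool := PySem.Chars.startswith (cs.drop i) t

def find_words_in_string_alt (terms_dict : List (String × Int)) (text : String) : List (String × List Int) :=
  let cs := text.toList
  let n := cs.length
  let keys := (PySem.Dict.ofList terms_dict).keys
  let hits := (List.range n).foldl (fun (h : PySem.Dict String (List Int)) i =>
      keys.foldl (fun h t =>
        if pvMatchAt t.toList cs i then h.modify t [] (· ++ [(i : Int)]) else h) h)
    PySem.Dict.empty
  (keys.foldl (fun (d : PySem.Dict String (List Int)) t =>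
      match hits.get? t with
      | some v => d.insert t v
      | none => d) PySem.Dict.empty).items

-- ===== PRECONDITION & SPEC =====
def Spec_find_words_in_string (terms_dict : List (String × Int)) (text : String) (out : List (String × List Int)) : Prop := out = find_words_in_string_alt terms_dict text
instance (terms_dict : List (String × Int)) (text : String) (out : List (String × List Int)) : Decidable (Spec_find_words_in_string terms_dict text out) := by unfold Spec_find_words_in_string; infer_instance

-- ===== CLAIM (what is proved, stated in full; the proofs are below) =====
def Claim_equal_find_words_in_string : Prop := ∀ (terms_dict : List (String × Int)) (text : String), Dom_find_words_in_string terms_dict text → Spec_find_words_in_string terms_dict text (find_words_in_string terms_dict text)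

-- ===== LEMMAS AND PROOFS =====

-- the common characterisation: all (overlap-allowing) match positions, in increasing order
def pvIdx (t cs : List Char) : List Int :=
  ((List.range cs.length).filter (pvMatchAt t cs)).map (fun i => (i : Int))

theorem pv_match_infix {t cs : List Char} {s i : Nat} (hs : s ≤ i)
    (hm : pvMatchAt t cs i = true) : t <:+: cs.drop s := by
  have hp : t <+: List.drop (i - s) (List.drop s cs) := by
    rw [List.drop_drop]
    have hsum : s + (i - s) = i := by omega
    rw [hsum]
    exact (PySem.Chars.startswith_iff _ _).1 hm
  exact hp.isInfix.trans (List.drop_suffix _ _).isInfix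

theorem findLoopA_eq (t cs : List Char) :
    ∀ (fuel start : Nat) (acc : List Int), cs.length - start ≤ fuel →
      findLoopA t cs start acc =
        acc ++ ((List.range' start (cs.length - start)).filter (pvMatchAt t cs)).map (fun i => (i : Int)) := by
  intro fuel
  induction fuel with
  | zero =>
    intro start acc hf
    have h : ¬ start < cs.length := by omega
    rw [findLoopA, dif_neg h]
    have h0 : cs.length - start = 0 := by omega
    simp [h0]
  | succ fuel ih =>
    intro start acc hf
    by_cases h : start < cs.length
    · rw [findLoopA, dif_pos h]
      by_cases hidx : PySem.Chars.findFrom cs t (start : Int) none = -1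
      · simp only [hidx, ne_eq, not_true_eq_false, dite_false]
        have hinf := (PySem.Chars.findFrom_natCast_eq_neg_one_iff cs t start (le_of_lt h)).1 hidx
        have hnil : (List.range' start (cs.length - start)).filter (pvMatchAt t cs) = [] := by
          rw [List.filter_eq_nil_iff]
          intro i hi hm
          have hle : start ≤ i := (List.mem_range'_1.1 hi).1
          exact hinf (pv_match_infix hle hm)
        simp [hnil]
      · simp only [hidx, ne_eq, not_false_eq_true, dite_true]
        obtain ⟨hge, hpre, hmin⟩ := PySem.Chars.findFrom_natCast_spec cs t start (le_of_lt h) hidx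
        set q := PySem.Chars.findFrom cs t (start : Int) none with hqdef
        have hq0 : (0 : Int) ≤ q := le_trans (by exact_mod_cast Nat.zero_le start) hge
        have hqn : (q.toNat : Int) = q := Int.toNat_of_nonneg hq0
        have hsq : start ≤ q.toNat := by omega
        have hqlt : q.toNat < cs.length := by
          by_cases ht : t = []
          · subst ht
            by_cases hlt : start < q.toNat
            · exact absurd (List.nil_prefix) (hmin start le_rfl hlt)
            · omega
          · have hne : List.drop q.toNat cs ≠ [] := by
              intro hnil
              rw [hnil, List.prefix_nil] at hpre
              exact ht hpre
            have hle : ¬ cs.length ≤ q.toNat := fun hle => hne (List.drop_eq_nil_of_le hle)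
            omega
        rw [ih (q.toNat + 1) (acc ++ [q]) (by omega)]
        have hsplit : List.range' start (cs.length - start) =
            List.range' start (q.toNat - start) ++ q.toNat :: List.range' (q.toNat + 1) (cs.length - (q.toNat + 1)) := by
          have h1 : List.range' start ((q.toNat - start) + ((cs.length - q.toNat - 1) + 1)) =
              List.range' start (q.toNat - start) ++ List.range' (start + 1 * (q.toNat - start)) ((cs.length - q.toNat - 1) + 1) := by
            rw [List.range'_append]
          have h2 : start + 1 * (q.toNat - start) = q.toNat := by omega
          have h3 : (q.toNat - start) + ((cs.length - q.toNat - 1) + 1) = cs.length - start := by omega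
          rw [h2, h3] at h1
          rw [h1, List.range'_succ]
          have h4 : cs.length - q.toNat - 1 = cs.length - (q.toNat + 1) := by omega
          rw [h4]
        have hfilt1 : (List.range' start (q.toNat - start)).filter (pvMatchAt t cs) = [] := by
          rw [List.filter_eq_nil_iff]
          intro i hi hm
          obtain ⟨h5, h6⟩ := List.mem_range'_1.1 hi
          exact hmin i h5 (by omega) ((PySem.Chars.startswith_iff _ _).1 hm)
        have hmq : pvMatchAt t cs q.toNat = true := (PySem.Chars.startswith_iff _ _).2 hpre
        rw [hsplit]
        simp [hfilt1, hmq, hqn]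
    · rw [findLoopA, dif_neg h]
      have h0 : cs.length - start = 0 := by omega
      simp [h0]

theorem findLoopA_zero (t cs : List Char) : findLoopA t cs 0 [] = pvIdx t cs := by
  have := findLoopA_eq t cs cs.length 0 [] (by omega)
  simpa [pvIdx, List.range_eq_range'] using this

theorem pv_get?_via (d : PySem.Dict String (List Int)) (k : String) :
    d.get? k = if d.contains k = true then some (d.getD k []) else none := by
  rw [PySem.Dict.contains_eq_isSome_get?, PySem.Dict.getD_eq_get?_getD]
  cases d.get? k <;> simp

theorem pv_inner_untouched (cs : List Char) (i : Nat) :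
    ∀ (keys : List String) (h : PySem.Dict String (List Int)) (t : String), t ∉ keys →
      (keys.foldl (fun h t =>
        if pvMatchAt t.toList cs i then h.modify t [] (· ++ [(i : Int)]) else h) h).getD t [] = h.getD t [] ∧
      (keys.foldl (fun h t =>
        if pvMatchAt t.toList cs i then h.modify t [] (· ++ [(i : Int)]) else h) h).contains t = h.contains t := by
  intro keys
  induction keys with
  | nil => intro h t _; exact ⟨rfl, rfl⟩
  | cons k rest ih =>
    intro h t hnm
    have htk : t ≠ k := fun he => hnm (he ▸ List.mem_cons_self)
    have htr : t ∉ rest := fun hm => hnm (List.mem_cons_of_mem _ hm)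
    rw [List.foldl_cons]
    rcases ih (if pvMatchAt k.toList cs i then h.modify k [] (· ++ [(i : Int)]) else h) t htr with ⟨h1, h2⟩
    refine ⟨h1.trans ?_, h2.trans ?_⟩ <;> by_cases hm : pvMatchAt k.toList cs i
    · simp [hm, PySem.Dict.getD_modify, htk]
    · simp [hm]
    · simp [hm, PySem.Dict.contains_modify, htk]
    · simp [hm]

theorem pv_inner_mem (cs : List Char) (i : Nat) :
    ∀ (keys : List String) (h : PySem.Dict String (List Int)) (t : String), keys.Nodup → t ∈ keys →
      (keys.foldl (fun h t =>
        if pvMatchAt t.toList cs i then h.modify t [] (· ++ [(i : Int)]) else h) h).getD t [] =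
        (if pvMatchAt t.toList cs i then h.getD t [] ++ [(i : Int)] else h.getD t []) ∧
      (keys.foldl (fun h t =>
        if pvMatchAt t.toList cs i then h.modify t [] (· ++ [(i : Int)]) else h) h).contains t =
        (h.contains t || pvMatchAt t.toList cs i) := by
  intro keys
  induction keys with
  | nil => intro h t _ hmem; exact absurd hmem (List.not_mem_nil)
  | cons k rest ih =>
    intro h t hnd hmem
    rw [List.nodup_cons] at hnd
    rw [List.foldl_cons]
    by_cases hte : t = k
    · subst hte
      rcases pv_inner_untouched cs i rest
        (if pvMatchAt t.toList cs i then h.modify t [] (· ++ [(i : Int)]) else h) t hnd.1 with ⟨h1, h2⟩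
      refine ⟨h1.trans ?_, h2.trans ?_⟩ <;> by_cases hm : pvMatchAt t.toList cs i
      · simp [hm, PySem.Dict.getD_modify]
      · simp [hm]
      · simp [hm, PySem.Dict.contains_modify]
      · simp [hm]
    · have htr : t ∈ rest := (List.mem_cons.1 hmem).resolve_left hte
      rcases ih (if pvMatchAt k.toList cs i then h.modify k [] (· ++ [(i : Int)]) else h) t hnd.2 htr with ⟨h1, h2⟩
      refine ⟨h1.trans ?_, h2.trans ?_⟩ <;> by_cases hm : pvMatchAt k.toList cs i
      · simp [hm, PySem.Dict.getD_modify, hte]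
      · simp [hm]
      · have hbk : (t == k) = false := beq_eq_false_iff_ne.2 hte
        simp [hm, PySem.Dict.contains_modify, hbk]
      · simp [hm]

theorem pv_outer (cs : List Char) (keys : List String) (hnd : keys.Nodup) :
    ∀ (n : Nat) (t : String), t ∈ keys →
      ((List.range n).foldl (fun (h : PySem.Dict String (List Int)) i =>
          keys.foldl (fun h t =>
            if pvMatchAt t.toList cs i then h.modify t [] (· ++ [(i : Int)]) else h) h)
        PySem.Dict.empty).getD t [] =
        ((List.range n).filter (pvMatchAt t.toList cs)).map (fun i => (i : Int)) ∧
      ((List.range n).foldl (fun (h : PySem.Dict String (List Int)) i =>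
          keys.foldl (fun h t =>
            if pvMatchAt t.toList cs i then h.modify t [] (· ++ [(i : Int)]) else h) h)
        PySem.Dict.empty).contains t = (List.range n).any (pvMatchAt t.toList cs) := by
  intro n
  induction n with
  | zero => intro t _; simp [PySem.Dict.getD_empty, PySem.Dict.contains_empty]
  | succ n ih =>
    intro t ht
    rcases ih t ht with ⟨h1, h2⟩
    rw [List.range_succ]
    rcases pv_inner_mem cs n keys _ t hnd ht with ⟨g1, g2⟩
    constructor
    · rw [List.foldl_append, List.foldl_cons, List.foldl_nil, g1, h1]
      by_cases hm : pvMatchAt t.toList cs n <;> simp [hm, List.filter_append]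
    · rw [List.foldl_append, List.foldl_cons, List.foldl_nil, g2, h2]
      by_cases hm : pvMatchAt t.toList cs n <;> simp [hm, List.any_append]

theorem find_words_in_string_spec : Claim_equal_find_words_in_string := by
  intro terms_dict text _
  unfold Spec_find_words_in_string
  unfold find_words_in_string find_words_in_string_alt
  dsimp only
  apply congrArg PySem.Dict.items
  apply PySem.List.foldl_congr_mem
  intro d t ht
  have hnd := PySem.Dict.nodup_keys_ofList (κ := String) (ν := Int) terms_dict
  rcases pv_outer text.toList _ hnd text.toList.length t ht with ⟨h1, h2⟩
  rw [pv_get?_via, h2, h1, findLoopA_zero]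
  simp only [pvIdx]
  by_cases hany : (List.range text.toList.length).any (pvMatchAt t.toList text.toList) = true
  · rw [if_pos hany]
    have hne : (List.range text.toList.length).filter (pvMatchAt t.toList text.toList) ≠ [] := by
      rcases List.any_eq_true.1 hany with ⟨x, hx, hpx⟩
      intro hnil
      exact absurd hpx (by simpa using (List.filter_eq_nil_iff.1 hnil) x hx)
    have hne' : ((List.range text.toList.length).filter (pvMatchAt t.toList text.toList)).map
        (fun i => (i : Int)) ≠ [] := by simpa using hne
    rw [if_neg hne']
  · rw [if_neg hany]
    have hnil : (List.range text.toList.length).filter (pvMatchAt t.toList text.toList) = [] := by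
      rw [List.filter_eq_nil_iff]
      intro x hx hpx
      exact hany (List.any_eq_true.2 ⟨x, hx, hpx⟩)
    rw [hnil]
    simp
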